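-- pv_equiv track=rewrite | github.com/EggHeadTimothy/python_edabit_exercises | advanced_list_sort.py | advanced_sort
-- ===== SOURCE A (Python) =====
-- def advanced_sort(lst):
--     """
--     We first create a list that contains the unique values from the original list, then we create a sublist for each
--     unique item containing the number of instances of that item in the original list.
--     """
--     result = []
--     unique_items = []
--     for thing in lst:
--         if thing not in unique_items:
--             unique_items.append(thing)
--     for thing in unique_items:
--         result.append([thing] * lst.count(thing))
--     return result
-- ===== SOURCE B (Python) =====
-- def advanced_sort(lst):
--     groups = {}
--     for x in lst:
--         groups.setdefault(x, []).append(x)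
--     return list(groups.values())
-- ===== Notes on version B (the rewrite author's own statement) =====
-- stated objective: faster
-- what changed: Replaces the two-pass scheme (quadratic membership-scan dedup plus lst.count per unique value) with a single pass that groups occurrences into a dict keyed by value and returns its values.
import Mathlib
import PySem

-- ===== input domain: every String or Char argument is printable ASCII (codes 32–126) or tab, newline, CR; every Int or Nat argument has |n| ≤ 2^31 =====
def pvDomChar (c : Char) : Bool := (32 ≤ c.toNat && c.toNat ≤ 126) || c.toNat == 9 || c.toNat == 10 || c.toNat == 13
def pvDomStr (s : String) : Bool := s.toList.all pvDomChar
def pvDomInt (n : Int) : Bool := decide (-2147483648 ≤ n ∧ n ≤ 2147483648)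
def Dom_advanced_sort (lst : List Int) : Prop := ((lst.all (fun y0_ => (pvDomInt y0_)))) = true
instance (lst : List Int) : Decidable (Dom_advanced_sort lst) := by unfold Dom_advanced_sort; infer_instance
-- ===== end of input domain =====

-- B groups occurrences into a dict in one pass instead of A's quadratic dedup+count; faster (O(n) vs O(n^2)).

-- ===== PORT A =====
def advanced_sort (lst : List Int) : List (List Int) :=
  let unique_items : List Int :=
    lst.foldl (fun u thing => if u.contains thing then u else u ++ [thing]) []
  unique_items.foldl
    (fun result thing => result ++ [PySem.List.pyRepeat [thing] (PySem.List.count lst thing : Int)]) []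

-- ===== PORT B =====
def advanced_sort_alt (lst : List Int) : List (List Int) :=
  (lst.foldl (fun g x => PySem.Dict.modify g x [] (fun v => v ++ [x])) PySem.Dict.empty).values

-- ===== PRECONDITION & SPEC =====
def Spec_advanced_sort (lst : List Int) (out : List (List Int)) : Prop := out = advanced_sort_alt lst
instance (lst : List Int) (out : List (List Int)) : Decidable (Spec_advanced_sort lst out) := by unfold Spec_advanced_sort; infer_instance

-- ===== CLAIM (what is proved, stated in full; the proofs are below) =====
def Claim_equal_advanced_sort : Prop := ∀ (lst : List Int), Dom_advanced_sort lst → Spec_advanced_sort lst (advanced_sort lst)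

-- ===== LEMMAS AND PROOFS =====

-- getD of B's grouping fold: prefix groups are the occurrences filtered by key
theorem getD_group_fold (l : List Int) (g : PySem.Dict Int (List Int)) (v : Int) :
    (l.foldl (fun g x => PySem.Dict.modify g x [] (fun w => w ++ [x])) g).getD v []
      = g.getD v [] ++ (l.filter (fun x => x == v)) := by
  induction l generalizing g with
  | nil => simp
  | cons x xs ih =>
    simp only [List.foldl_cons, ih, List.filter_cons]
    rw [PySem.Dict.getD_modify]
    by_cases h : v = x
    · subst h; simp
    · have hx : ¬ ((x == v) = true) := by simp; exact fun he => h he.symm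
      simp [h, hx]

-- A's dedup loop is PySem.Set.ofList
theorem unique_eq_ofList (lst : List Int) :
    lst.foldl (fun u thing => if u.contains thing then u else u ++ [thing]) []
      = PySem.Set.ofList lst := by
  rw [PySem.Set.ofList_eq_foldl]
  apply PySem.List.foldl_congr_mem
  intro u x _; simp [PySem.Set.add]

theorem advanced_sort_eq (lst : List Int) : advanced_sort lst = advanced_sort_alt lst := by
  unfold advanced_sort advanced_sort_alt
  have hkeys : (lst.foldl (fun g x => PySem.Dict.modify g x [] (fun v => v ++ [x]))
      PySem.Dict.empty).keys = PySem.Set.ofList lst := by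
    rw [PySem.Dict.keys_foldl_modify]
    simp [PySem.Dict.empty, PySem.Dict.keys, PySem.Set.update_nil_left]
  have hnd : (lst.foldl (fun g x => PySem.Dict.modify g x [] (fun v => v ++ [x]))
      PySem.Dict.empty).keys.Nodup := by
    rw [hkeys]; exact PySem.Set.nodup_ofList lst
  rw [PySem.Dict.values_eq_map_keys _ hnd ([] : List Int), hkeys]
  rw [unique_eq_ofList]
  rw [PySem.List.foldl_append_singleton_eq_map]
  apply List.map_congr_left
  intro t _
  rw [getD_group_fold, List.filter_beq]
  simp [PySem.List.pyRepeat_singleton, PySem.List.count]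

-- ===== VERDICT (by name: the statement is the Claim_ definition above) =====
theorem advanced_sort_spec : Claim_equal_advanced_sort := by
  intro lst _
  unfold Spec_advanced_sort
  exact advanced_sort_eq lst
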